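-- pv_equiv track=rewrite | github.com/johnxpark/algorithm | kakao/kakao2018_binary.py | solution
-- ===== SOURCE A (Python) =====
-- MAP = {10: 'A', 11: 'B', 12: 'C', 13: 'D', 14: 'E', 15: 'F'}
--
-- def translate(num):
--     if num in MAP:
--         return MAP[num]
--     return str(num)
--
-- def calculate(n, num):
--     if num < n:
--         return translate(num)
--
--     result = ''
--     while num >= n:
--         remainder = translate(num % n)
--         num //= n
--         result = remainder + result
--     return translate(num) + result
--
-- def solution(n, t, m, p):
--     members = ['' for i in range(m + 1)]
--     num = 0
--     idx = 1
--     while True: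
--         temp = calculate(n, num)
--         while True:
--             members[idx] += temp[0]
--             if len(members[p]) >= t:
--                 return members[p]
--             if len(temp) == 1:
--                 break
--             temp = temp[1:]
--             idx += 1
--             if idx > m:
--                 idx = 1
--         num += 1
-- ===== SOURCE B (Python) =====
-- def solution(n, t, m, p):
--     """Players 1..m take turns announcing the digits of 0, 1, 2, ... written in
--     base n (digits 10..15 shown as A..F).  A digit passes the turn to the next
--     player, except a number's last digit: its speaker also opens the next
--     number.  Hence digit j of number k (at overall position g + j, where g is
--     the number's first overall position) is spoken by player (g + j - k) % m + 1.
--     Returns the first t digits player p speaks."""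
--     out = []
--     g = 0        # overall position of the current number's first digit
--     k = 0        # the number currently being spoken
--     while len(out) < t:
--         s = rep(k, n)
--         first = (p - 1 - g + k) % m
--         out.extend(s[j] for j in range(first, len(s), m))
--         g += len(s)
--         k += 1
--     return ''.join(out[:t])
--
--
-- def rep(num, n):
--     """num written in base n, digits 10..15 as A..F, larger digits in decimal."""
--     if num == 0:
--         return "0"
--     digits = "0123456789ABCDEF"
--     s = ""
--     while num > 0:
--         d = num % n
--         s = (digits[d] if d < 16 else str(d)) + s
--         num //= n
--     return s
-- ===== Notes on version B (the rewrite author's own statement) =====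
-- stated objective: alternative
-- what changed: B drops A's (m+1)-array of all players' transcripts and its per-character cyclic scan with mid-string early return: it derives the closed-form speaker formula (digit j of number k at overall position g+j is spoken by player (g+j-k)%m+1), collects player p's digits per number by stride arithmetic (offset (p-1-g+k)%m, step m), and truncates to t at the end; Pre_ excludes inputs where A raises or diverges (n=0; n<=1 with t>=1 beyond the base-1 single-digit request; p=0 with t>=1; p>m or p<-m-1) and negative p with t>=1, where A answers via Python negative-index wraparound.
-- intended difference: On t <= 0 with p = 1 or p = -m A returns '0' (one character is dealt to member 1, reachable as index 1 or -m, before the length test fires) while B returns '', the first max(t,0) characters, the intended value for a non-positive request. — e.g. on solution(2, 0, 3, 1): A returns "0", B returns ""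
-- outside the precondition, e.g. on solution(2, 2, 3, -1): A returns '11', B returns '01'
import Mathlib
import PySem

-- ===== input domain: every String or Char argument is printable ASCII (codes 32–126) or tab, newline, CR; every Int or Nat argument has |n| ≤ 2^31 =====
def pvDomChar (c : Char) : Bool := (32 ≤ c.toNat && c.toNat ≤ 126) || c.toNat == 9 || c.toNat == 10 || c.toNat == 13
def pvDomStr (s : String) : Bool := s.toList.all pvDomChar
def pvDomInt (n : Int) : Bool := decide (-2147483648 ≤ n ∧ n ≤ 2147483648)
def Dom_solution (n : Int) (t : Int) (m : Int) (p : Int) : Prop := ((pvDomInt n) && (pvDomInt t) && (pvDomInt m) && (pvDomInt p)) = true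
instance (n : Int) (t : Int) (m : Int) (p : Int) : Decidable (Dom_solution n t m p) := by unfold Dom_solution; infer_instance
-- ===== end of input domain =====

-- B replaces A's (m+1)-array of transcripts and per-character cyclic scan by a closed-form
-- speaker formula with stride extraction of player p's digits; the proved equality is about
-- return values (A mutates only locals).

-- fuel bound for both while-loops (a totality guard only; proved sufficient below)
def pvFuel (n t m : Int) : Nat := n.toNat + m.toNat * (t.toNat + 1) + 2

-- ===== PORT A =====
def pvMAP : PySem.Dict Int (List Char) :=
  PySem.Dict.ofList [(10, ['A']), (11, ['B']), (12, ['C']), (13, ['D']), (14, ['E']), (15, ['F'])]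

def pvTranslate (num : Int) : List Char :=
  match pvMAP.get? num with
  | some s => s
  | none => PySem.Int.toChars num

def pvCalcLoop (n : Int) : Nat → Int → List Char → List Char
  | 0, num, result => pvTranslate num ++ result      -- fuel backstop (unreachable for n ≥ 2)
  | fuel+1, num, result =>
    if n ≤ num then
      pvCalcLoop n fuel (PySem.Int.floordiv num n) (pvTranslate (PySem.Int.mod num n) ++ result)
    else pvTranslate num ++ result

def pvCalculate (n num : Int) : List Char :=
  if num < n then pvTranslate num
  else pvCalcLoop n num.natAbs num []

-- inner while: distribute the characters of temp; Sum.inl = early return, Sum.inr = break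
def pvInner (t m p : Int) : List Char → List (List Char) → Int → (List Char) ⊕ (List (List Char) × Int)
  | [], members, idx => Sum.inr (members, idx)       -- unreachable: temp is never empty
  | ch :: rest, members, idx =>
    let members' := PySem.List.pySetD members idx (PySem.List.pyGetD members idx [] ++ [ch])
    if t ≤ ((PySem.List.pyGetD members' p []).length : Int) then
      Sum.inl (PySem.List.pyGetD members' p [])
    else if rest = [] then Sum.inr (members', idx)
    else
      let idx' := idx + 1
      pvInner t m p rest members' (if m < idx' then 1 else idx')

def pvOuter (n t m p : Int) : Nat → Int → List (List Char) → Int → List Char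
  | 0, _, _, _ => []                                  -- fuel backstop (unreachable under Pre_)
  | fuel+1, num, members, idx =>
    match pvInner t m p (pvCalculate n num) members idx with
    | Sum.inl res => res
    | Sum.inr (members', idx') => pvOuter n t m p fuel (num + 1) members' idx'

def solution (n : Int) (t : Int) (m : Int) (p : Int) : String :=
  String.ofList (pvOuter n t m p (pvFuel n t m) 0 (List.replicate (m + 1).toNat []) 1)

-- ===== PORT B =====
def pvDigs : List Char := ['0','1','2','3','4','5','6','7','8','9','A','B','C','D','E','F']

def pvRepLoop (n : Int) : Nat → Int → List Char → List Char
  | 0, _, s => s                                      -- fuel backstop (unreachable for n ≥ 2)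
  | fuel+1, num, s =>
    if 0 < num then
      pvRepLoop n fuel (PySem.Int.floordiv num n)
        ((if PySem.Int.mod num n < 16 then [PySem.List.pyGetD pvDigs (PySem.Int.mod num n) ' ']
          else PySem.Int.toChars (PySem.Int.mod num n)) ++ s)
    else s

def pvRep (n num : Int) : List Char :=
  if num = 0 then ['0'] else pvRepLoop n num.natAbs num []

-- B's while loop: k = the number being spoken, g = overall position of its first digit
def pvBLoop (n t m p : Int) : Nat → Int → List Char → Int → List Char
  | 0, _, acc, _ => acc                               -- fuel backstop (unreachable under Pre_)
  | fuel+1, k, acc, g =>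
    if (acc.length : Int) < t then
      let s := pvRep n k
      let first := PySem.Int.mod (p - 1 - g + k) m
      let acc' := acc ++ (PySem.List.pyRange first (s.length : Int) m).map
          (fun j => PySem.List.pyGetD s j ' ')
      pvBLoop n t m p fuel (k + 1) acc' (g + (s.length : Int))
    else acc

def solution_alt (n : Int) (t : Int) (m : Int) (p : Int) : String :=
  String.ofList (PySem.List.slice (pvBLoop n t m p (pvFuel n t m) 0 [] 0) none (some t))

-- ===== PRECONDITION & SPEC =====
-- Pre_ admits the contest's natural domain (base n ≥ 2, m ≥ 1 players, player 1 ≤ p ≤ m) and,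
-- since a t ≤ 0 request ends before base-n arithmetic or a full round matters, also t ≤ 0 with
-- n ≥ 1 and -m-1 ≤ p ≤ m, and the base-1 requests answered by number 0 alone (n = 1, t = 1,
-- p = 1; base 1 makes A loop forever on any later number); outside it A diverges (n ≤ 1 with
-- t ≥ 1 otherwise, or p = 0 with t ≥ 1), raises (ZeroDivisionError for n = 0, IndexError for
-- p > m or p < -m-1), or answers via Python negative-index wraparound (p < 0 with t ≥ 1),
-- which the natural B does not mimic.
def Pre_solution (n : Int) (t : Int) (m : Int) (p : Int) : Prop :=
  (2 ≤ n ∧ 1 ≤ m ∧ 1 ≤ p ∧ p ≤ m) ∨ (t ≤ 0 ∧ 1 ≤ n ∧ 1 ≤ m ∧ -(m+1) ≤ p ∧ p ≤ m) ∨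
  (n = 1 ∧ t = 1 ∧ 1 ≤ m ∧ p = 1)
instance (n : Int) (t : Int) (m : Int) (p : Int) : Decidable (Pre_solution n t m p) := by
  unfold Pre_solution; infer_instance

def pvWitness_solution : Int × Int × Int × Int := (2, 4, 5, 3)

-- On t ≤ 0 with p = 1 or p = -m A returns "0" (one character is dealt to member 1, reachable as
-- index 1 or -m, before the length test fires) while B returns "", the first max(t,0) characters,
-- the intended value for a non-positive request.
def D_solution (n : Int) (t : Int) (m : Int) (p : Int) : Prop := t ≤ 0 ∧ (p = 1 ∨ p = -m)
instance (n : Int) (t : Int) (m : Int) (p : Int) : Decidable (D_solution n t m p) := by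
  unfold D_solution; infer_instance

def Spec_solution (n : Int) (t : Int) (m : Int) (p : Int) (out : String) : Prop :=
  ¬ D_solution n t m p → out = solution_alt n t m p
instance (n : Int) (t : Int) (m : Int) (p : Int) (out : String) : Decidable (Spec_solution n t m p out) := by
  unfold Spec_solution; infer_instance

def pvDiffWitness_solution : Int × Int × Int × Int := (2, 0, 3, 1)
def pvDiffWitnessOut_solution : String × String := ("0", "")

-- ===== CLAIM (what is proved, stated in full; the proofs are below) =====
def Claim_unchanged_solution : Prop := ∀ (n : Int) (t : Int) (m : Int) (p : Int),
  Dom_solution n t m p → Pre_solution n t m p → Spec_solution n t m p (solution n t m p)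
def Claim_changed_solution : Prop :=
  Dom_solution (pvDiffWitness_solution.1) (pvDiffWitness_solution.2.1) (pvDiffWitness_solution.2.2.1) (pvDiffWitness_solution.2.2.2) ∧
  Pre_solution (pvDiffWitness_solution.1) (pvDiffWitness_solution.2.1) (pvDiffWitness_solution.2.2.1) (pvDiffWitness_solution.2.2.2) ∧
  D_solution (pvDiffWitness_solution.1) (pvDiffWitness_solution.2.1) (pvDiffWitness_solution.2.2.1) (pvDiffWitness_solution.2.2.2) ∧
  solution (pvDiffWitness_solution.1) (pvDiffWitness_solution.2.1) (pvDiffWitness_solution.2.2.1) (pvDiffWitness_solution.2.2.2) = pvDiffWitnessOut_solution.1 ∧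
  solution_alt (pvDiffWitness_solution.1) (pvDiffWitness_solution.2.1) (pvDiffWitness_solution.2.2.1) (pvDiffWitness_solution.2.2.2) = pvDiffWitnessOut_solution.2 ∧
  pvDiffWitnessOut_solution.1 ≠ pvDiffWitnessOut_solution.2
def Claim_exact_solution : Prop := ∀ (n : Int) (t : Int) (m : Int) (p : Int),
  Dom_solution n t m p → Pre_solution n t m p → D_solution n t m p →
  solution n t m p ≠ solution_alt n t m p

-- ===== LEMMAS AND PROOFS =====

lemma map_get?_eq (d : Int) : pvMAP.get? d =
    if d = 10 then some ['A'] else if d = 11 then some ['B'] else if d = 12 then some ['C']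
    else if d = 13 then some ['D'] else if d = 14 then some ['E'] else if d = 15 then some ['F']
    else none := by
  simp only [pvMAP, PySem.Dict.ofList, PySem.Dict.update, List.foldl, PySem.Dict.get?_insert,
    PySem.Dict.get?_empty]
  split_ifs <;> first | rfl | omega

lemma toDigitsCore_ne_nil : ∀ (f : Nat) (b n : Nat) (ds : List Char), f ≠ 0 ∨ ds ≠ [] →
    Nat.toDigitsCore b f n ds ≠ [] := by
  intro f
  induction f with
  | zero => intro b n ds h; simpa [Nat.toDigitsCore] using h.resolve_left (by simp)
  | succ f ih =>
    intro b n ds h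
    rw [Nat.toDigitsCore]
    split
    · simp
    · exact ih b _ _ (Or.inr (by simp))

lemma translate_ne_nil (d : Int) (hd : 0 ≤ d) : pvTranslate d ≠ [] := by
  unfold pvTranslate
  rw [map_get?_eq]
  split_ifs <;> try simp
  rw [PySem.Int.toChars, if_neg (by omega)]
  exact toDigitsCore_ne_nil _ _ _ _ (Or.inl (by omega))

-- B's digit renderer equals A's translate for nonnegative d

lemma trB_eq_translate (d : Int) (hd : 0 ≤ d) :
    (if d < 16 then [PySem.List.pyGetD pvDigs d ' '] else PySem.Int.toChars d) = pvTranslate d := by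
  by_cases h : d < 16
  · rw [if_pos h]
    interval_cases d <;> decide
  · rw [if_neg h]
    unfold pvTranslate
    rw [map_get?_eq]
    split_ifs <;> first | omega | rfl

-- canonical little-endian digit-string list (empty for 0)

def pvDigsLE (b : Nat) : Nat → List (List Char)
  | k => if k = 0 ∨ b < 2 then [] else pvTranslate ((k % b : Nat) : Int) :: pvDigsLE b (k / b)
  termination_by k => k
  decreasing_by
    rename_i h
    push_neg at h
    exact Nat.div_lt_self (by omega) (by omega)

def pvCanon (b k : Nat) : List Char := if k = 0 then ['0'] else ((pvDigsLE b k).reverse).flatten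

lemma calcLoop_eq (b : Nat) (hb : 2 ≤ b) : ∀ (fuel k : Nat), 1 ≤ k → k ≤ fuel → ∀ acc,
    pvCalcLoop (b : Int) fuel (k : Int) acc = ((pvDigsLE b k).reverse).flatten ++ acc := by
  intro fuel
  induction fuel with
  | zero => intro k hk hkf; omega
  | succ fuel ih =>
    intro k hk hkf acc
    rw [pvCalcLoop]
    by_cases h : b ≤ k
    · rw [if_pos (show (b:Int) ≤ (k:Int) by exact_mod_cast h)]
      rw [PySem.Int.floordiv_natCast, PySem.Int.mod_natCast]
      have hdiv : k / b < k := Nat.div_lt_self (by omega) (by omega)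
      have h1 : 1 ≤ k / b := Nat.one_le_div_iff (by omega) |>.mpr h
      rw [ih (k / b) h1 (by omega)]
      conv_rhs => rw [pvDigsLE, if_neg (show ¬ (k = 0 ∨ b < 2) by omega)]
      simp
    · rw [if_neg (show ¬ (b:Int) ≤ (k:Int) by exact_mod_cast h)]
      rw [pvDigsLE, if_neg (show ¬ (k = 0 ∨ b < 2) by omega)]
      rw [pvDigsLE, if_pos (show k / b = 0 ∨ b < 2 from Or.inl (Nat.div_eq_of_lt (by omega)))]
      simp [Nat.mod_eq_of_lt (show k < b by omega)]

lemma calculate_eq_canon (n : Int) (hn : 2 ≤ n) (k : Nat) :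
    pvCalculate n (k : Int) = pvCanon n.toNat k := by
  have hbn : n = ((n.toNat : Nat) : Int) := by omega
  unfold pvCalculate pvCanon
  by_cases h0 : k = 0
  · subst h0
    rw [if_pos (by omega), if_pos rfl]
    decide
  · rw [if_neg (Ne.intro h0)]
    by_cases h : (k:Int) < n
    · rw [if_pos h]
      rw [pvDigsLE, if_neg (show ¬ (k = 0 ∨ n.toNat < 2) by omega)]
      rw [pvDigsLE, if_pos (Or.inl (Nat.div_eq_of_lt (by omega)))]
      simp [Nat.mod_eq_of_lt (show k < n.toNat by omega)]
    · rw [if_neg h]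
      have hna : ((k:Int).natAbs) = k := by omega
      have hcl := calcLoop_eq n.toNat (by omega) k k (by omega) (le_refl _) []
      rw [show ((n.toNat : Nat) : Int) = n by omega] at hcl
      rw [hna, hcl]
      simp

lemma repLoop_zero (b : Int) : ∀ (f : Nat) (acc : List Char), pvRepLoop b f 0 acc = acc := by
  intro f acc; cases f <;> simp [pvRepLoop]

lemma repLoop_eq (b : Nat) (hb : 2 ≤ b) : ∀ (fuel k : Nat), 1 ≤ k → k ≤ fuel → ∀ acc,
    pvRepLoop (b : Int) fuel (k : Int) acc = ((pvDigsLE b k).reverse).flatten ++ acc := by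
  intro fuel
  induction fuel with
  | zero => intro k hk hkf; omega
  | succ fuel ih =>
    intro k hk hkf acc
    rw [pvRepLoop]
    rw [if_pos (show (0:Int) < (k:Int) by exact_mod_cast hk)]
    rw [PySem.Int.floordiv_natCast, PySem.Int.mod_natCast]
    rw [trB_eq_translate _ (by positivity)]
    by_cases h : b ≤ k
    · have hdiv : k / b < k := Nat.div_lt_self (by omega) (by omega)
      have h1 : 1 ≤ k / b := Nat.one_le_div_iff (by omega) |>.mpr h
      rw [ih (k / b) h1 (by omega)]
      conv_rhs => rw [pvDigsLE, if_neg (show ¬ (k = 0 ∨ b < 2) by omega)]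
      simp
    · rw [show ((k/b : Nat) : Int) = 0 by simp [Nat.div_eq_of_lt (show k < b by omega)]]
      rw [repLoop_zero]
      rw [pvDigsLE, if_neg (show ¬ (k = 0 ∨ b < 2) by omega)]
      rw [pvDigsLE, if_pos (Or.inl (Nat.div_eq_of_lt (by omega)))]
      simp

lemma rep_eq_calculate (n : Int) (hn : 2 ≤ n) (k : Nat) :
    pvRep n (k : Int) = pvCalculate n (k : Int) := by
  rw [calculate_eq_canon n hn k]
  have hbn : n = ((n.toNat : Nat) : Int) := by omega
  unfold pvRep pvCanon
  by_cases h0 : k = 0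
  · subst h0; rw [if_pos (by norm_num), if_pos rfl]
  · rw [if_neg (show ¬ ((k:Int) = 0) by exact_mod_cast h0), if_neg h0]
    have hna : ((k:Int).natAbs) = k := by omega
    have hrl := repLoop_eq n.toNat (by omega) k k (by omega) (le_refl _) []
    rw [show ((n.toNat : Nat) : Int) = n by omega] at hrl
    rw [hna, hrl]
    simp

lemma digsLE_all_ne_nil (b : Nat) : ∀ k, ∀ x ∈ pvDigsLE b k, x ≠ [] := by
  intro k
  induction k using Nat.strong_induction_on with
  | _ k ih =>
    intro x hx
    by_cases h : k = 0 ∨ b < 2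
    · rw [pvDigsLE, if_pos h] at hx; simp at hx
    · rw [pvDigsLE, if_neg h] at hx
      rcases List.mem_cons.mp hx with h1 | h2
      · subst h1; exact translate_ne_nil _ (by positivity)
      · exact ih (k / b) (Nat.div_lt_self (by omega) (by omega)) x h2

lemma flatten_len_ge {l : List (List Char)} (h : ∀ x ∈ l, x ≠ []) : l.length ≤ l.flatten.length := by
  induction l with
  | nil => simp
  | cons x xs ih =>
    simp only [List.flatten_cons, List.length_append, List.length_cons]
    have hx : 1 ≤ x.length := by
      have := h x (by simp); cases x <;> simp_all
    have := ih (fun y hy => h y (by simp [hy]))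
    omega

lemma digsLE_len1 (b k : Nat) (hb : 2 ≤ b) (hk : 1 ≤ k) : 1 ≤ (pvDigsLE b k).length := by
  rw [pvDigsLE, if_neg (show ¬ (k = 0 ∨ b < 2) by omega)]
  simp

lemma digsLE_len2 (b k : Nat) (hb : 2 ≤ b) (hk : b ≤ k) : 2 ≤ (pvDigsLE b k).length := by
  rw [pvDigsLE, if_neg (show ¬ (k = 0 ∨ b < 2) by omega)]
  rw [pvDigsLE, if_neg (show ¬ (k / b = 0 ∨ b < 2) by
      have := Nat.one_le_div_iff (show 0 < b by omega) |>.mpr hk; omega)]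
  simp

lemma canon_len1 (b k : Nat) (hb : 2 ≤ b) : 1 ≤ (pvCanon b k).length := by
  unfold pvCanon
  by_cases h0 : k = 0
  · simp [h0]
  · rw [if_neg h0]
    calc (1:Nat) ≤ (pvDigsLE b k).length := digsLE_len1 b k hb (by omega)
      _ = ((pvDigsLE b k).reverse).length := by simp
      _ ≤ _ := flatten_len_ge (by intro x hx; exact digsLE_all_ne_nil b k x (List.mem_reverse.mp hx))

lemma canon_ne_nil (b k : Nat) (hb : 2 ≤ b) : pvCanon b k ≠ [] :=
  List.ne_nil_of_length_pos (canon_len1 b k hb)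

lemma canon_len2 (b k : Nat) (hb : 2 ≤ b) (hk : b ≤ k) : 2 ≤ (pvCanon b k).length := by
  unfold pvCanon
  rw [if_neg (show ¬ k = 0 by omega)]
  calc (2:Nat) ≤ (pvDigsLE b k).length := digsLE_len2 b k hb hk
    _ = ((pvDigsLE b k).reverse).length := by simp
    _ ≤ _ := flatten_len_ge (by intro x hx; exact digsLE_all_ne_nil b k x (List.mem_reverse.mp hx))

-- selection: characters at offsets ≡ d (mod M) counting down (d = distance to next pick)

def pvSel (M : Nat) : Nat → List Char → List Char
  | _, [] => []
  | d, c :: rest => if d = 0 then c :: pvSel M (M-1) rest else pvSel M (d-1) rest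

def pvDist (M P r : Nat) : Nat := (P - 1 + M - r) % M

lemma dist_lt (M P r : Nat) (hM : 1 ≤ M) : pvDist M P r < M := Nat.mod_lt _ (by omega)

lemma dist_zero_iff (M P r : Nat) (hM : 1 ≤ M) (hP1 : 1 ≤ P) (hPM : P ≤ M) (hr : r < M) :
    (pvDist M P r = 0 ↔ r = P - 1) := by
  unfold pvDist
  constructor
  · intro h
    rcases Nat.lt_or_ge r (P - 1) with hlt | hge
    · rw [Nat.mod_eq_sub_mod (by omega), Nat.mod_eq_of_lt (by omega)] at h; omega
    · rcases Nat.eq_or_lt_of_le hge with he | hgt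
      · omega
      · rw [Nat.mod_eq_of_lt (by omega)] at h; omega
  · intro h; subst h
    rw [show P - 1 + M - (P - 1) = M by omega, Nat.mod_self]

lemma dist_succ (M P r : Nat) (hM : 1 ≤ M) (hP1 : 1 ≤ P) (hPM : P ≤ M) (hr : r < M) :
    pvDist M P ((r + 1) % M) = if pvDist M P r = 0 then M - 1 else pvDist M P r - 1 := by
  unfold pvDist
  by_cases hw : r + 1 = M
  · rw [hw, Nat.mod_self, Nat.sub_zero]
    have hL : (P - 1 + M) % M = P - 1 := by
      rw [Nat.add_mod_right]; exact Nat.mod_eq_of_lt (by omega)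
    rw [hL, show P - 1 + M - r = P by omega]
    by_cases hP : P = M
    · rw [hP, Nat.mod_self, if_pos rfl]
    · rw [Nat.mod_eq_of_lt (by omega), if_neg (by omega)]
  · rw [Nat.mod_eq_of_lt (show r + 1 < M by omega)]
    have hv1 : 1 ≤ P - 1 + M - r := by omega
    have hv2 : P - 1 + M - r < 2 * M := by omega
    rw [show P - 1 + M - (r + 1) = (P - 1 + M - r) - 1 by omega]
    rcases Nat.lt_or_ge (P - 1 + M - r) M with hlo | hhi
    · rw [Nat.mod_eq_of_lt hlo, Nat.mod_eq_of_lt (by omega), if_neg (by omega)]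
    · have hm1 : (P - 1 + M - r) % M = (P - 1 + M - r) - M := by
        rw [Nat.mod_eq_sub_mod hhi, Nat.mod_eq_of_lt (by omega)]
      by_cases h0 : P - 1 + M - r = M
      · rw [h0, Nat.mod_self, if_pos rfl, Nat.mod_eq_of_lt (by omega)]
      · have hge : M ≤ (P - 1 + M - r) - 1 := by omega
        rw [Nat.mod_eq_sub_mod hge, Nat.mod_eq_of_lt (by omega), hm1, if_neg (by omega)]
        omega

-- B-side: the pyRange(first, len, m) comprehension computes pvSel

lemma pyRange_nat (a b s : Nat) (hs : 0 < s) :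
    PySem.List.pyRange (a:Int) (b:Int) (s:Int) =
      (List.range ((b - a + s - 1)/s)).map (fun k => ((a + s*k : Nat) : Int)) := by
  rw [PySem.List.pyRange_of_pos _ _ (by exact_mod_cast hs)]
  have hcnt : (if (a:Int) < (b:Int) then (((b:Int) - a + s - 1) / s).toNat else 0)
      = (b - a + s - 1)/s := by
    by_cases h : a < b
    · rw [if_pos (by exact_mod_cast h)]
      rw [show (b:Int) - a + s - 1 = ((b - a + s - 1 : Nat) : Int) by push_cast; omega]
      rw [← Int.natCast_ediv]
      exact Int.toNat_natCast _
    · rw [if_neg (by exact_mod_cast h)]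
      have : b - a = 0 := by omega
      rw [this, Nat.zero_add, Nat.div_eq_of_lt (by omega)]
  rw [hcnt]
  apply List.map_congr_left
  intro k _
  push_cast
  ring

lemma selB_aux (M : Nat) (hM : 1 ≤ M) : ∀ (s : List Char) (d : Nat), d < M →
    (List.range ((s.length - d + M - 1)/M)).map (fun k => s.getD (d + M*k) ' ') = pvSel M d s := by
  intro s
  induction s with
  | nil =>
    intro d hd
    rw [show (List.length [] - d + M - 1)/M = 0 from Nat.div_eq_of_lt (by simp; omega)]
    simp [pvSel]
  | cons c rest ih =>
    intro d hd
    by_cases hd0 : d = 0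
    · subst hd0
      have hcnt : ((c :: rest).length - 0 + M - 1)/M = (rest.length - (M-1) + M - 1)/M + 1 := by
        simp only [List.length_cons, Nat.sub_zero]
        rw [show rest.length + 1 + M - 1 = rest.length + M by omega, Nat.add_div_right _ (by omega)]
        congr 1
        rcases Nat.lt_or_ge rest.length (M-1) with hlt | hge
        · rw [Nat.div_eq_of_lt (by omega),
            show rest.length - (M-1) = 0 by omega, Nat.zero_add, Nat.div_eq_of_lt (by omega)]
        · rw [show rest.length - (M-1) + M - 1 = rest.length by omega]
      rw [hcnt, List.range_succ_eq_map]
      rw [List.map_cons, List.map_map]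
      simp only [Nat.mul_zero, Nat.add_zero, List.getD_cons_zero]
      rw [pvSel, if_pos rfl]
      congr 1
      rw [← ih (M-1) (by omega)]
      apply List.map_congr_left
      intro k _
      simp only [Function.comp]
      rw [show 0 + M*(k+1) = (M - 1 + M*k) + 1 by rw [Nat.mul_succ]; omega]
      rw [List.getD_cons_succ]
    · have hcnt : ((c :: rest).length - d + M - 1)/M = (rest.length - (d-1) + M - 1)/M := by
        simp only [List.length_cons]
        rw [show rest.length + 1 - d = rest.length - (d-1) by omega]
      rw [hcnt]
      rw [pvSel, if_neg hd0]
      rw [← ih (d-1) (by omega)]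
      apply List.map_congr_left
      intro k _
      rw [show d + M*k = ((d-1) + M*k) + 1 by omega]
      rw [List.getD_cons_succ]

lemma selB (M : Nat) (hM : 1 ≤ M) (s : List Char) (d : Nat) (hd : d < M) :
    (PySem.List.pyRange ((d:Nat):Int) ((s.length:Int)) ((M:Nat):Int)).map
      (fun j => PySem.List.pyGetD s j ' ') = pvSel M d s := by
  rw [pyRange_nat _ _ _ (by omega), List.map_map]
  rw [← selB_aux M hM s d hd]
  apply List.map_congr_left
  intro k _
  simp only [Function.comp_apply, PySem.List.pyGetD_natCast]

lemma inner_spec (M P T : Nat) (hM1 : 1 ≤ M) (hP1 : 1 ≤ P) (hPM : P ≤ M) :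
    ∀ (temp : List Char), temp ≠ [] → ∀ (members : List (List Char)) (r : Nat) (acc : List Char),
    members.length = M + 1 → r < M →
    PySem.List.pyGetD members ((P:Nat):Int) [] = acc → acc.length < T →
    ((T ≤ acc.length + (pvSel M (pvDist M P r) temp).length →
        pvInner (T:Int) (M:Int) (P:Int) temp members ((r:Int)+1)
          = Sum.inl ((acc ++ pvSel M (pvDist M P r) temp).take T))
     ∧ (acc.length + (pvSel M (pvDist M P r) temp).length < T → ∃ members',
          pvInner (T:Int) (M:Int) (P:Int) temp members ((r:Int)+1)
            = Sum.inr (members', ((((r + (temp.length - 1)) % M : Nat) : Int)+1))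
          ∧ members'.length = M + 1
          ∧ PySem.List.pyGetD members' ((P:Nat):Int) [] = acc ++ pvSel M (pvDist M P r) temp
          ∧ (T - 1 - (acc.length + (pvSel M (pvDist M P r) temp).length)) * M
              + pvDist M P ((r + (temp.length - 1)) % M) + (temp.length - 1)
              ≤ (T - 1 - acc.length) * M + pvDist M P r)) := by
  intro temp
  induction temp with
  | nil => intro h; exact absurd rfl h
  | cons ch rest ih =>
    intro _ members r acc hlen hr hgetP hk
    have hidx : ((r:Int)+1).toNat = r + 1 := by omega
    have hsetP : PySem.List.pyGetD (PySem.List.pySetD members ((r:Int)+1)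
        (PySem.List.pyGetD members ((r:Int)+1) [] ++ [ch])) ((P:Nat):Int) []
        = if r + 1 = P then acc ++ [ch] else acc := by
      rw [PySem.List.pySetD_of_nonneg _ _ (by omega), hidx]
      rw [PySem.List.pyGetD_of_nonneg _ _ (by omega)]
      rw [show ((P:Int)).toNat = P by omega]
      rw [List.getD_eq_getElem _ _ (by rw [List.length_set]; omega)]
      rw [List.getElem_set]
      by_cases hcase : r + 1 = P
      · rw [if_pos hcase, if_pos hcase]
        rw [PySem.List.pyGetD_of_nonneg _ _ (by omega), hidx]
        rw [PySem.List.pyGetD_of_nonneg _ _ (by omega),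
          show ((P:Int)).toNat = P by omega] at hgetP
        rw [hcase, List.getD_eq_getElem _ _ (by omega)] at *
        rw [hgetP]
      · rw [if_neg hcase, if_neg hcase]
        rw [PySem.List.pyGetD_of_nonneg _ _ (by omega),
          show ((P:Int)).toNat = P by omega, List.getD_eq_getElem _ _ (by omega)] at hgetP
        exact hgetP
    have hlen' : (PySem.List.pySetD members ((r:Int)+1)
        (PySem.List.pyGetD members ((r:Int)+1) [] ++ [ch])).length = M + 1 := by
      rw [PySem.List.length_pySetD]; exact hlen
    have hwrap : (if (M:Int) < ((r:Int)+1+1) then (1:Int) else ((r:Int)+1+1))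
        = ((((r+1) % M : Nat)):Int) + 1 := by
      by_cases hw : r + 1 = M
      · rw [if_pos (by exact_mod_cast (by omega : (M:Int) < (r:Int)+1+1))]
        rw [show (r+1) % M = 0 by rw [hw, Nat.mod_self]]
        simp
      · rw [if_neg (by push_cast; omega)]
        rw [Nat.mod_eq_of_lt (by omega)]
        push_cast; ring
    have hr' : (r+1) % M < M := Nat.mod_lt _ (by omega)
    by_cases hcase : r + 1 = P
    · -- hit: this character goes to player p
      have hd0 : pvDist M P r = 0 := (dist_zero_iff M P r hM1 hP1 hPM hr).mpr (by omega)
      rw [hd0]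
      rw [pvSel, if_pos rfl]
      simp only [pvInner]
      rw [hsetP, if_pos hcase]
      by_cases hret : T ≤ acc.length + 1
      · rw [if_pos (show (T:Int) ≤ (((acc ++ [ch]).length : Nat) : Int) by
          have h1 : (acc ++ [ch]).length = acc.length + 1 := by simp
          rw [h1]; exact_mod_cast hret)]
        constructor
        · intro _
          have hTeq : T = (acc ++ [ch]).length := by simp; omega
          rw [show acc ++ ch :: pvSel M (M-1) rest = (acc ++ [ch]) ++ pvSel M (M-1) rest by simp]
          rw [hTeq, List.take_left]
        · intro hlt; simp at hlt; omega
      · rw [if_neg (show ¬ (T:Int) ≤ (((acc ++ [ch]).length : Nat) : Int) by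
          have h1 : (acc ++ [ch]).length = acc.length + 1 := by simp
          rw [h1]; exact_mod_cast hret)]
        by_cases hrest : rest = []
        · subst hrest
          rw [if_pos rfl]
          constructor
          · intro hcon; simp [pvSel] at hcon; omega
          · intro _
            refine ⟨PySem.List.pySetD members ((r:Int)+1)
              (PySem.List.pyGetD members ((r:Int)+1) [] ++ [ch]), ?_, hlen', ?_, ?_⟩
            · simp only [List.length_cons, List.length_nil, Nat.add_sub_cancel, Nat.add_zero]
              rw [Nat.mod_eq_of_lt hr]
            · rw [hsetP, if_pos hcase]; simp [pvSel]
            · simp only [pvSel, List.length_cons, List.length_nil, Nat.add_sub_cancel, Nat.add_zero]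
              rw [Nat.mod_eq_of_lt hr, hd0]
              have hmul : (T - 1 - (acc.length + 1)) * M ≤ (T - 1 - acc.length) * M :=
                Nat.mul_le_mul_right _ (by omega)
              omega
        · rw [if_neg hrest]
          rw [hwrap]
          have hds : pvDist M P ((r+1) % M) = M - 1 := by
            rw [dist_succ M P r hM1 hP1 hPM hr, if_pos hd0]
          obtain ⟨ihret, ihcont⟩ := ih hrest _ ((r+1) % M) (acc ++ [ch])
            hlen' hr' (by rw [hsetP, if_pos hcase]) (by simp; omega)
          rw [hds] at ihret ihcont
          have hrl : 1 ≤ rest.length := List.length_pos_iff.mpr hrest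
          constructor
          · intro hT
            rw [ihret (by simp at hT ⊢; omega)]
            rw [show acc ++ ch :: pvSel M (M-1) rest = (acc ++ [ch]) ++ pvSel M (M-1) rest by simp]
          · intro hlt
            obtain ⟨members2, he, hl, hg, hphi⟩ := ihcont (by simp at hlt ⊢; omega)
            refine ⟨members2, ?_, hl, ?_, ?_⟩
            · rw [he]
              have hidxeq : ((r+1) % M + (rest.length - 1)) % M
                  = (r + ((ch :: rest).length - 1)) % M := by
                rw [Nat.mod_add_mod]
                congr 1
                simp only [List.length_cons, Nat.add_sub_cancel]
                omega
              rw [hidxeq]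
            · rw [hg]; simp
            · have hidxeq : ((r+1) % M + (rest.length - 1)) % M
                  = (r + ((ch :: rest).length - 1)) % M := by
                rw [Nat.mod_add_mod]
                congr 1
                simp only [List.length_cons, Nat.add_sub_cancel]
                omega
              rw [hidxeq] at hphi
              have hmul : (T - 1 - (acc.length + 1)) * M + M = (T - 1 - acc.length) * M := by
                rw [show T - 1 - acc.length = (T - 1 - (acc.length + 1)) + 1 by omega]
                rw [Nat.succ_mul]
              simp only [List.length_append, List.length_cons, List.length_nil,
                Nat.add_sub_cancel, Nat.zero_add] at hphi ⊢
              rw [show acc.length + ((pvSel M (M-1) rest).length + 1)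
                  = acc.length + 1 + (pvSel M (M-1) rest).length by omega]
              omega
    · -- miss: the character goes to another player
      have hdne : pvDist M P r ≠ 0 := fun h0 =>
        hcase (by have := (dist_zero_iff M P r hM1 hP1 hPM hr).mp h0; omega)
      rw [pvSel, if_neg hdne]
      simp only [pvInner]
      rw [hsetP, if_neg hcase]
      rw [if_neg (show ¬ (T:Int) ≤ ((acc.length : Nat) : Int) by exact_mod_cast (by omega : ¬ T ≤ acc.length))]
      by_cases hrest : rest = []
      · subst hrest
        rw [if_pos rfl]
        constructor
        · intro hcon; simp [pvSel] at hcon; omega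
        · intro _
          refine ⟨PySem.List.pySetD members ((r:Int)+1)
            (PySem.List.pyGetD members ((r:Int)+1) [] ++ [ch]), ?_, hlen', ?_, ?_⟩
          · simp only [List.length_cons, List.length_nil, Nat.add_sub_cancel, Nat.add_zero]
            rw [Nat.mod_eq_of_lt hr]
          · rw [hsetP, if_neg hcase]; simp [pvSel]
          · simp only [pvSel, List.length_cons, List.length_nil, Nat.add_sub_cancel, Nat.add_zero]
            rw [Nat.mod_eq_of_lt hr]
      · rw [if_neg hrest]
        rw [hwrap]
        have hds : pvDist M P ((r+1) % M) = pvDist M P r - 1 := by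
          rw [dist_succ M P r hM1 hP1 hPM hr, if_neg hdne]
        obtain ⟨ihret, ihcont⟩ := ih hrest _ ((r+1) % M) acc
          hlen' hr' (by rw [hsetP, if_neg hcase]) hk
        rw [hds] at ihret ihcont
        have hrl : 1 ≤ rest.length := List.length_pos_iff.mpr hrest
        constructor
        · intro hT
          exact ihret hT
        · intro hlt
          obtain ⟨members2, he, hl, hg, hphi⟩ := ihcont hlt
          have hidxeq : ((r+1) % M + (rest.length - 1)) % M
              = (r + ((ch :: rest).length - 1)) % M := by
            rw [Nat.mod_add_mod]
            congr 1
            simp only [List.length_cons, Nat.add_sub_cancel]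
            omega
          refine ⟨members2, ?_, hl, hg, ?_⟩
          · rw [he, hidxeq]
          · rw [hidxeq] at hphi
            simp only [List.length_cons, Nat.add_sub_cancel] at hphi ⊢
            omega

lemma bloop_done (n t m p : Int) (f : Nat) (num : Int) (acc : List Char) (g : Int)
    (h : t ≤ (acc.length : Int)) : pvBLoop n t m p f num acc g = acc := by
  cases f with
  | zero => rfl
  | succ f => rw [pvBLoop, if_neg (by omega)]

lemma main_spec (n : Int) (M P T : Nat) (hn : 2 ≤ n) (hM1 : 1 ≤ M) (hP1 : 1 ≤ P)
    (hPM : P ≤ M) (hT1 : 1 ≤ T) :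
    ∀ (fuel : Nat) (num : Int) (members : List (List Char)) (r : Nat) (acc : List Char) (g : Int),
    0 ≤ num → members.length = M + 1 → r < M →
    PySem.List.pyGetD members ((P:Nat):Int) [] = acc → acc.length < T →
    (g - num) % (M:Int) = (r:Int) →
    (n.toNat - num.toNat) + ((T - 1 - acc.length) * M + pvDist M P r) + 1 < fuel →
    pvOuter n (T:Int) (M:Int) (P:Int) fuel num members ((r:Int)+1)
      = (pvBLoop n (T:Int) (M:Int) (P:Int) fuel num acc g).take T := by
  intro fuel
  induction fuel with
  | zero => intro num members r acc g _ _ _ _ _ _ hbud; omega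
  | succ fuel ih =>
    intro num members r acc g hnum hlen hr hgetP hk hgr hbud
    have hnum' : num = ((num.toNat : Nat) : Int) := by omega
    have htemp : pvCalculate n num = pvCanon n.toNat num.toNat := by
      rw [hnum']; exact calculate_eq_canon n hn num.toNat
    have hrepeq : pvRep n num = pvCalculate n num := by
      rw [hnum', rep_eq_calculate n hn num.toNat]
    have htne : pvCalculate n num ≠ [] := by rw [htemp]; exact canon_ne_nil _ _ (by omega)
    have hL1 : 1 ≤ (pvCalculate n num).length := List.length_pos_iff.mpr htne
    -- g - num = M*q + r
    have hq0 := Int.ediv_add_emod (g - num) (M:Int)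
    rw [hgr] at hq0
    set q : Int := (g - num) / (M:Int) with hqdef
    have hq : g - num = (M:Int) * q + (r:Int) := hq0.symm
    have hstart : PySem.Int.mod ((P:Int) - 1 - g + num) ((M:Int)) = ((pvDist M P r : Nat) : Int) := by
      rw [PySem.Int.mod_eq_emod_of_pos (by exact_mod_cast hM1)]
      have h1 : ((pvDist M P r : Nat) : Int) = ((P:Int) - 1 + M - r) % (M:Int) := by
        unfold pvDist
        rw [Int.natCast_emod]
        congr 1
        push_cast
        omega
      have h2 : (P:Int) - 1 - g + num = ((P:Int) - 1 + (M:Int) - (r:Int)) + (M:Int) * (-q - 1) := by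
        linear_combination (-1 : Int) * hq
      rw [h1, h2, Int.add_mul_emod_self_left]
    have hsel := selB M hM1 (pvCalculate n num) (pvDist M P r) (dist_lt M P r hM1)
    have hgr' : (g + ((pvCalculate n num).length : Int) - (num + 1)) % (M:Int)
        = (((r + ((pvCalculate n num).length - 1)) % M : Nat) : Int) := by
      have h3 : g + ((pvCalculate n num).length : Int) - (num + 1)
          = ((r:Int) + ((pvCalculate n num).length : Int) - 1) + (M:Int) * q := by
        linear_combination hq
      rw [h3, Int.add_mul_emod_self_left, Int.natCast_emod]
      congr 1
      push_cast
      omega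
    obtain ⟨iret, icont⟩ := inner_spec M P T hM1 hP1 hPM (pvCalculate n num) htne
      members r acc hlen hr hgetP hk
    rw [pvOuter, pvBLoop]
    rw [if_pos (show ((acc.length:Nat):Int) < ((T:Nat):Int) by exact_mod_cast hk)]
    simp only [hrepeq, hstart, hsel]
    by_cases hcase : T ≤ acc.length + (pvSel M (pvDist M P r) (pvCalculate n num)).length
    · rw [iret hcase]
      rw [bloop_done _ _ _ _ _ _ _ _ (by
        simp only [List.length_append]
        exact_mod_cast hcase)]
    · push_neg at hcase
      obtain ⟨members2, he, hg, hgp, hphi⟩ := icont hcase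
      rw [he]
      change pvOuter n (T:Int) (M:Int) (P:Int) fuel (num + 1) members2
        ((((r + ((pvCalculate n num).length - 1)) % M : Nat) : Int) + 1) = _
      have hr2 : (r + ((pvCalculate n num).length - 1)) % M < M := Nat.mod_lt _ (by omega)
      rw [ih (num+1) members2 ((r + ((pvCalculate n num).length - 1)) % M) _
        (g + ((pvCalculate n num).length : Int)) (by omega) hg hr2 hgp
        (by simp only [List.length_append]; omega) hgr' ?_]
      have hplus : (num+1).toNat = num.toNat + 1 := by omega
      rw [hplus]
      rcases Nat.lt_or_ge num.toNat n.toNat with hlt | hge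
      · have : pvDist M P ((r + ((pvCalculate n num).length - 1)) % M) < M :=
          dist_lt _ _ _ hM1
        have hmono : (T - 1 - (acc.length + (pvSel M (pvDist M P r) (pvCalculate n num)).length)) * M
            ≤ (T - 1 - acc.length) * M := Nat.mul_le_mul_right _ (by omega)
        simp only [List.length_append] at *
        omega
      · have hL2 : 2 ≤ (pvCalculate n num).length := by
          rw [htemp]; exact canon_len2 _ _ (by omega) (by omega)
        simp only [List.length_append] at *
        omega

lemma slice_nil (a b : Option Int) : PySem.List.slice ([] : List Char) a b = [] := by
  simp [PySem.List.slice]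

lemma members0_getP (M P : Nat) (hPM : P ≤ M) :
    PySem.List.pyGetD (List.replicate (M + 1) ([] : List Char)) ((P:Nat):Int) [] = [] := by
  rw [PySem.List.pyGetD_of_nonneg _ _ (by omega), show ((P:Int)).toNat = P by omega]
  rw [List.getD_eq_getElem _ _ (by simp; omega)]
  simp

lemma equal_pos (n t m p : Int) (hn : 2 ≤ n) (hm : 1 ≤ m) (hp1 : 1 ≤ p) (hpm : p ≤ m)
    (ht : 1 ≤ t) : solution n t m p = solution_alt n t m p := by
  obtain ⟨M, rfl⟩ : ∃ M : Nat, m = (M : Int) := ⟨m.toNat, by omega⟩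
  obtain ⟨P, rfl⟩ : ∃ P : Nat, p = (P : Int) := ⟨p.toNat, by omega⟩
  obtain ⟨T, rfl⟩ : ∃ T : Nat, t = (T : Int) := ⟨t.toNat, by omega⟩
  have hM1 : 1 ≤ M := by exact_mod_cast hm
  have hP1 : 1 ≤ P := by exact_mod_cast hp1
  have hPM : P ≤ M := by exact_mod_cast hpm
  have hT1 : 1 ≤ T := by exact_mod_cast ht
  unfold solution solution_alt
  have hrep : ((M:Int) + 1).toNat = M + 1 := by omega
  rw [hrep]
  have hbud : (n.toNat - (0:Int).toNat) + ((T - 1 - ([] : List Char).length) * M + pvDist M P 0) + 1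
      < pvFuel n (T:Int) (M:Int) := by
    unfold pvFuel
    have hd := dist_lt M P 0 hM1
    obtain ⟨S, hS⟩ : ∃ S, T = S + 1 := ⟨T - 1, by omega⟩
    have h1 : (T - 1) * M = S * M := by rw [hS]; simp
    have h4 : T * M = S * M + M := by rw [hS, Nat.succ_mul]
    have h2 : ((M:Int)).toNat * (((T:Int)).toNat + 1) = M * T + M := by
      rw [Int.toNat_natCast, Int.toNat_natCast, Nat.mul_add, Nat.mul_one]
    have h3 : M * T = T * M := Nat.mul_comm M T
    simp only [List.length_nil, Nat.sub_zero, Int.toNat_zero]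
    omega
  have hmain := main_spec n M P T hn hM1 hP1 hPM hT1 (pvFuel n (T:Int) (M:Int)) 0
    (List.replicate (M + 1) []) 0 [] 0 (by omega) (by simp) (by omega)
    (members0_getP M P hPM) (by simp only [List.length_nil]; omega) (by simp) hbud
  simp only [Nat.cast_zero, zero_add] at hmain
  rw [hmain]
  rw [PySem.List.slice_to _ (by positivity), Int.toNat_natCast]

lemma A_nonpos (n t m p : Int) (hn : 1 ≤ n) (hm : 1 ≤ m) (hp0 : -(m+1) ≤ p) (hpm : p ≤ m)
    (ht : t ≤ 0) : solution n t m p = if p = 1 ∨ p = -m then "0" else "" := by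
  obtain ⟨M, rfl⟩ : ∃ M : Nat, m = (M : Int) := ⟨m.toNat, by omega⟩
  have hM1 : 1 ≤ M := by exact_mod_cast hm
  obtain ⟨f, hf⟩ : ∃ f, pvFuel n t (M:Int) = f + 1 := ⟨pvFuel n t (M:Int) - 1, by unfold pvFuel; omega⟩
  unfold solution
  rw [hf, show ((M:Int) + 1).toNat = M + 1 by omega]
  rw [pvOuter]
  have hcalc0 : pvCalculate n 0 = ['0'] := by
    unfold pvCalculate
    rw [if_pos (by omega)]
    decide
  rw [hcalc0]
  simp only [pvInner]
  have hset : PySem.List.pySetD (List.replicate (M + 1) ([] : List Char)) 1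
      (PySem.List.pyGetD (List.replicate (M + 1) ([] : List Char)) 1 [] ++ ['0'])
      = (List.replicate (M + 1) ([] : List Char)).set 1 ['0'] := by
    rw [PySem.List.pySetD_of_nonneg _ _ (by omega)]
    congr 1
    rw [PySem.List.pyGetD_of_nonneg _ _ (by omega)]
    rw [List.getD_eq_getElem _ _ (by simp; omega)]
    rw [List.getElem_replicate]
    simp
  rw [hset]
  have hgot : PySem.List.pyGetD ((List.replicate (M + 1) ([] : List Char)).set 1 ['0'])
      p [] = if p = 1 ∨ p = -(M:Int) then ['0'] else [] := by
    by_cases hp : 0 ≤ p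
    · obtain ⟨P, rfl⟩ : ∃ P : Nat, p = (P : Int) := ⟨p.toNat, by omega⟩
      rw [PySem.List.pyGetD_of_nonneg _ _ (by omega), show ((P:Int)).toNat = P by omega]
      rw [List.getD_eq_getElem _ _ (by simp; omega)]
      rw [List.getElem_set]
      by_cases hP : P = 1
      · rw [if_pos (by omega), if_pos (by omega)]
      · rw [if_neg (by omega), if_neg (by omega), List.getElem_replicate]
    · obtain ⟨K, hK⟩ : ∃ K : Nat, p = -(K : Int) := ⟨(-p).toNat, by omega⟩
      subst hK
      rw [PySem.List.pyGetD_neg_natCast _ _ _ (by omega) (by simp; omega)]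
      have hlen : ((List.replicate (M + 1) ([] : List Char)).set 1 ['0']).length = M + 1 := by simp
      rw [List.getElem_set]
      by_cases hKM : K = M
      · rw [if_pos (by simp [hKM]), if_pos (by omega)]
      · rw [if_neg (by simp; omega), if_neg (by omega), List.getElem_replicate]
  rw [hgot]
  by_cases hP : p = 1 ∨ p = -(M:Int)
  · rw [if_pos hP, if_pos (show t ≤ ((['0'].length : Nat) : Int) by simp; omega), if_pos hP]
  · rw [if_neg hP, if_pos (show t ≤ ((([] : List Char).length : Nat) : Int) by simp; omega),
      if_neg hP]

lemma A_base1 (m : Int) (hm : 1 ≤ m) : solution 1 1 m 1 = "0" := by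
  obtain ⟨M, rfl⟩ : ∃ M : Nat, m = (M : Int) := ⟨m.toNat, by omega⟩
  have hM1 : 1 ≤ M := by exact_mod_cast hm
  obtain ⟨f, hf⟩ : ∃ f, pvFuel 1 1 (M:Int) = f + 1 := ⟨pvFuel 1 1 (M:Int) - 1, by unfold pvFuel; omega⟩
  unfold solution
  rw [hf, show ((M:Int) + 1).toNat = M + 1 by omega]
  rw [pvOuter]
  have hcalc0 : pvCalculate 1 0 = ['0'] := by
    unfold pvCalculate
    rw [if_pos (by omega)]
    decide
  rw [hcalc0]
  simp only [pvInner]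
  have hset : PySem.List.pySetD (List.replicate (M + 1) ([] : List Char)) 1
      (PySem.List.pyGetD (List.replicate (M + 1) ([] : List Char)) 1 [] ++ ['0'])
      = (List.replicate (M + 1) ([] : List Char)).set 1 ['0'] := by
    rw [PySem.List.pySetD_of_nonneg _ _ (by omega)]
    congr 1
    rw [PySem.List.pyGetD_of_nonneg _ _ (by omega)]
    rw [List.getD_eq_getElem _ _ (by simp; omega)]
    rw [List.getElem_replicate]
    simp
  rw [hset]
  have hgot : PySem.List.pyGetD ((List.replicate (M + 1) ([] : List Char)).set 1 ['0'])
      1 [] = ['0'] := by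
    rw [PySem.List.pyGetD_of_nonneg _ _ (by omega)]
    rw [List.getD_eq_getElem _ _ (by simp; omega)]
    rw [List.getElem_set, if_pos (by norm_num)]
  rw [hgot]
  rw [if_pos (show (1:Int) ≤ ((['0'].length : Nat):Int) by norm_num)]
  try rfl

lemma B_base1 (m : Int) (hm : 1 ≤ m) : solution_alt 1 1 m 1 = "0" := by
  obtain ⟨M, rfl⟩ : ∃ M : Nat, m = (M : Int) := ⟨m.toNat, by omega⟩
  have hM1 : 1 ≤ M := by exact_mod_cast hm
  obtain ⟨f, hf⟩ : ∃ f, pvFuel 1 1 (M:Int) = f + 1 := ⟨pvFuel 1 1 (M:Int) - 1, by unfold pvFuel; omega⟩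
  unfold solution_alt
  rw [hf, pvBLoop, if_pos (by norm_num)]
  have hrep0 : pvRep 1 0 = ['0'] := by unfold pvRep; rw [if_pos rfl]
  have hmod0 : PySem.Int.mod (1 - 1 - 0 + 0) ((M:Nat):Int) = (((0:Nat)):Int) := by
    rw [show (1 - 1 - 0 + 0 : Int) = ((0:Nat):Int) by norm_num, PySem.Int.mod_natCast]
    simp
  simp only [hrep0, hmod0]
  have hrange : PySem.List.pyRange (((0:Nat)):Int) ((['0'].length : Nat):Int) ((M:Nat):Int)
      = [((0:Nat):Int)] := by
    rw [show ((['0'].length : Nat):Int) = ((1:Nat):Int) by norm_num]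
    rw [pyRange_nat 0 1 M (by omega)]
    rw [show 1 - 0 + M - 1 = M by omega, Nat.div_self (by omega)]
    simp
  rw [hrange]
  simp only [List.map_cons, List.map_nil]
  rw [show PySem.List.pyGetD ['0'] (((0:Nat)):Int) ' ' = '0' from rfl]
  rw [bloop_done _ _ _ _ _ _ _ _ (by simp)]
  rw [PySem.List.slice_to _ (by norm_num)]
  rfl

lemma B_nonpos (n t m p : Int) (ht : t ≤ 0) : solution_alt n t m p = "" := by
  unfold solution_alt
  obtain ⟨f, hf⟩ : ∃ f, pvFuel n t m = f + 1 := ⟨pvFuel n t m - 1, by unfold pvFuel; omega⟩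
  rw [hf, pvBLoop, if_neg (by simp; omega), slice_nil]

-- ===== VERDICT (by name: the statement is the Claim_ definition above) =====
theorem solution_spec : Claim_unchanged_solution := by
  unfold Claim_unchanged_solution
  intro n t m p _ hpre
  unfold Spec_solution
  intro hD
  by_cases ht : 1 ≤ t
  · rcases hpre with ⟨hn, hm, hp1, hpm⟩ | ⟨ht0, _⟩ | ⟨hn1, ht1, hm, hp1⟩
    · exact equal_pos n t m p hn hm hp1 hpm ht
    · omega
    · subst hn1; subst ht1; subst hp1
      rw [A_base1 m hm, B_base1 m hm]
  · have ht0 : t ≤ 0 := by omega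
    have hp : ¬ (p = 1 ∨ p = -m) := by
      intro he
      exact hD ⟨ht0, he⟩
    have hb : 1 ≤ n ∧ 1 ≤ m ∧ -(m+1) ≤ p ∧ p ≤ m := by
      rcases hpre with ⟨hn, hm, hp1, hpm⟩ | ⟨_, hn, hm, hp0, hpm⟩ | ⟨_, ht1, _, _⟩
      · exact ⟨by omega, by omega, by omega, by omega⟩
      · exact ⟨by omega, by omega, by omega, by omega⟩
      · omega
    rw [A_nonpos n t m p hb.1 hb.2.1 hb.2.2.1 hb.2.2.2 ht0, if_neg hp, B_nonpos n t m p ht0]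

theorem solution_changed : Claim_changed_solution := by unfold Claim_changed_solution; decide

theorem solution_tight : Claim_exact_solution := by
  unfold Claim_exact_solution
  intro n t m p _ hpre hD
  obtain ⟨ht0, hpe⟩ := hD
  have hb : 1 ≤ n ∧ 1 ≤ m ∧ -(m+1) ≤ p ∧ p ≤ m := by
    rcases hpre with ⟨hn, hm, hp1, hpm⟩ | ⟨_, hn, hm, hp0, hpm⟩ | ⟨_, ht1, _, _⟩
    · exact ⟨by omega, by omega, by omega, by omega⟩
    · exact ⟨by omega, by omega, by omega, by omega⟩
    · omega
  rw [A_nonpos n t m p hb.1 hb.2.1 hb.2.2.1 hb.2.2.2 ht0, if_pos hpe, B_nonpos n t m p ht0]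
  decide
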